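-- pv_equiv track=rewrite | github.com/mpygruu/advent-of-code-2022 | day09/grid_preparer.py | max_destination_counts
-- ===== SOURCE A (Python) =====
-- def max_destination_counts(destinations: list[str], counts: list[int]) -> tuple[int,int,int,int]:
--     right, bottom = 0,0
--     left_max, right_max, top_max, bottom_max = 0,0,0,0
--
--     for i in range(len(counts)):
--         if destinations[i] == 'L':
--             right -= counts[i]
--             if left_max < -right and right < 0:
--                 left_max = -right
--         if destinations[i] == 'R':
--             right += counts[i]
--             if right_max < right:
--                 right_max = right
--         if destinations[i] == 'U':
--             bottom -= counts[i]
--             if(top_max < -bottom) and bottom < 0: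
--                 top_max = -bottom
--         if destinations[i] == 'D':
--             bottom += counts[i]
--             if(bottom_max < bottom):
--                 bottom_max = bottom
--
--     return (left_max, right_max, top_max, bottom_max)
-- ===== SOURCE B (Python) =====
-- def max_destination_counts(destinations: list[str], counts: list[int]) -> tuple[int, int, int, int]:
--     # Two-phase: record the trajectory (position after each move), then take
--     # the extremes per direction with comprehensions instead of running maxima.
--     dx = {'L': -1, 'R': 1}
--     dy = {'U': -1, 'D': 1}
--     x, y = 0, 0
--     steps = []
--     for i in range(len(counts)):
--         d = destinations[i]
--         x += dx.get(d, 0) * counts[i]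
--         y += dy.get(d, 0) * counts[i]
--         steps.append((d, x, y))
--     left = max([0] + [-px for (d, px, _) in steps if d == 'L'])
--     right = max([0] + [px for (d, px, _) in steps if d == 'R'])
--     top = max([0] + [-py for (d, _, py) in steps if d == 'U'])
--     bottom = max([0] + [py for (d, _, py) in steps if d == 'D'])
--     return (left, right, top, bottom)
-- ===== Notes on version B (the rewrite author's own statement) =====
-- stated objective: alternative
-- what changed: A keeps four running directional maxima updated inside one indexed loop; B first records the whole trajectory (direction, position after each move) in one pass and then computes each of the four extremes afterwards with a filter/map comprehension over the recorded steps.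
import Mathlib
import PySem

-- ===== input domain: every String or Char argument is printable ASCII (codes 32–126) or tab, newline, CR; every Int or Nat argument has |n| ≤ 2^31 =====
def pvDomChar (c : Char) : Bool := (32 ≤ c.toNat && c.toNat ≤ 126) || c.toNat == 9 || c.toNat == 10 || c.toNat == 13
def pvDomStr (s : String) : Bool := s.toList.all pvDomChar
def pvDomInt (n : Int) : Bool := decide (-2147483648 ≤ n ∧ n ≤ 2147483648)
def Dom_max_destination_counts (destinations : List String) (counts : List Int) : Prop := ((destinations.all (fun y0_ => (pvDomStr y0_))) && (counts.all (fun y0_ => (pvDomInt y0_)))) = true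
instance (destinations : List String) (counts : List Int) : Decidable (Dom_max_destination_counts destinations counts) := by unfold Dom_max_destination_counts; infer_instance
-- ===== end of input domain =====

-- B records the whole trajectory first and takes the four extremes afterwards,
-- instead of A's four running maxima maintained inside the loop (objective: alternative).

-- ===== PORT A =====
-- loop body of A: the four sequential 'if' blocks, state (right, bottom, left_max, right_max, top_max, bottom_max)
def stepA (st : Int × Int × Int × Int × Int × Int) (d : String) (c : Int) :
    Int × Int × Int × Int × Int × Int :=
  let right := st.1
  let bottom := st.2.1
  let lm := st.2.2.1
  let rm := st.2.2.2.1
  let tm := st.2.2.2.2.1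
  let bm := st.2.2.2.2.2
  let right := if d = "L" then right - c else right
  let lm := if d = "L" ∧ lm < -right ∧ right < 0 then -right else lm
  let right := if d = "R" then right + c else right
  let rm := if d = "R" ∧ rm < right then right else rm
  let bottom := if d = "U" then bottom - c else bottom
  let tm := if d = "U" ∧ tm < -bottom ∧ bottom < 0 then -bottom else tm
  let bottom := if d = "D" then bottom + c else bottom
  let bm := if d = "D" ∧ bm < bottom then bottom else bm
  (right, bottom, lm, rm, tm, bm)

def max_destination_counts (destinations : List String) (counts : List Int) : Int × Int × Int × Int :=
  let st := (PySem.List.pyRange 0 (counts.length : Int) 1).foldl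
    (fun st i => stepA st (PySem.List.pyGetD destinations i "") (PySem.List.pyGetD counts i 0))
    (0, 0, 0, 0, 0, 0)
  (st.2.2.1, st.2.2.2.1, st.2.2.2.2.1, st.2.2.2.2.2)

-- ===== PORT B =====
def dxOf (d : String) : Int := PySem.Dict.getD (PySem.Dict.ofList [("L", -1), ("R", 1)]) d 0
def dyOf (d : String) : Int := PySem.Dict.getD (PySem.Dict.ofList [("U", -1), ("D", 1)]) d 0

-- loop body of B: advance the position and append the step record
def stepB (st : Int × Int × List (String × Int × Int)) (d : String) (c : Int) :
    Int × Int × List (String × Int × Int) :=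
  let x := st.1 + dxOf d * c
  let y := st.2.1 + dyOf d * c
  (x, y, st.2.2 ++ [(d, x, y)])

-- max([0] + l)
def pyMax0 (l : List Int) : Int := (PySem.List.max? ((0 : Int) :: l) (fun y => y)).getD 0

def max_destination_counts_alt (destinations : List String) (counts : List Int) : Int × Int × Int × Int :=
  let st := (PySem.List.pyRange 0 (counts.length : Int) 1).foldl
    (fun st i => stepB st (PySem.List.pyGetD destinations i "") (PySem.List.pyGetD counts i 0))
    (0, 0, [])
  let steps := st.2.2
  let left := pyMax0 ((steps.filter (fun p => p.1 == "L")).map (fun p => -p.2.1))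
  let right := pyMax0 ((steps.filter (fun p => p.1 == "R")).map (fun p => p.2.1))
  let top := pyMax0 ((steps.filter (fun p => p.1 == "U")).map (fun p => -p.2.2))
  let bottom := pyMax0 ((steps.filter (fun p => p.1 == "D")).map (fun p => p.2.2))
  (left, right, top, bottom)

-- ===== PRECONDITION & SPEC =====
-- A indexes destinations[i] for every i < len(counts): IndexError (a raise, no value) when
-- destinations is shorter than counts; exactly those inputs are excluded.
def Pre_max_destination_counts (destinations : List String) (counts : List Int) : Prop :=
  counts.length ≤ destinations.length
instance (destinations : List String) (counts : List Int) : Decidable (Pre_max_destination_counts destinations counts) := by unfold Pre_max_destination_counts; infer_instance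
def pvWitness_max_destination_counts : List String × List Int := (["R", "U", "L"], [3, 2, 7])

def Spec_max_destination_counts (destinations : List String) (counts : List Int) (out : Int × Int × Int × Int) : Prop := out = max_destination_counts_alt destinations counts
instance (destinations : List String) (counts : List Int) (out : Int × Int × Int × Int) : Decidable (Spec_max_destination_counts destinations counts out) := by unfold Spec_max_destination_counts; infer_instance

-- ===== CLAIM (what is proved, stated in full; the proofs are below) =====
def Claim_equal_max_destination_counts : Prop := ∀ (destinations : List String) (counts : List Int), Dom_max_destination_counts destinations counts → Pre_max_destination_counts destinations counts → Spec_max_destination_counts destinations counts (max_destination_counts destinations counts)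

-- ===== LEMMAS AND PROOFS =====

-- the four aggregations B performs on the recorded trajectory, in foldl-max form
def fL (s : List (String × Int × Int)) : Int :=
  ((s.filter (fun p => p.1 == "L")).map (fun p => -p.2.1)).foldl max 0
def fR (s : List (String × Int × Int)) : Int :=
  ((s.filter (fun p => p.1 == "R")).map (fun p => p.2.1)).foldl max 0
def fU (s : List (String × Int × Int)) : Int :=
  ((s.filter (fun p => p.1 == "U")).map (fun p => -p.2.2)).foldl max 0
def fD (s : List (String × Int × Int)) : Int :=
  ((s.filter (fun p => p.1 == "D")).map (fun p => p.2.2)).foldl max 0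

lemma pyMax0_eq (l : List Int) : pyMax0 l = l.foldl max 0 := by
  simp [pyMax0, PySem.List.max?_id_cons]

lemma fL_nonneg (s : List (String × Int × Int)) : 0 ≤ fL s :=
  (PySem.List.le_foldl_max _ 0).1
lemma fR_nonneg (s : List (String × Int × Int)) : 0 ≤ fR s :=
  (PySem.List.le_foldl_max _ 0).1
lemma fU_nonneg (s : List (String × Int × Int)) : 0 ≤ fU s :=
  (PySem.List.le_foldl_max _ 0).1
lemma fD_nonneg (s : List (String × Int × Int)) : 0 ≤ fD s :=
  (PySem.List.le_foldl_max _ 0).1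

lemma fL_append (s : List (String × Int × Int)) (p : String × Int × Int) :
    fL (s ++ [p]) = if p.1 = "L" then max (fL s) (-p.2.1) else fL s := by
  simp only [fL, List.filter_append, List.map_append, List.foldl_append,
    List.filter_cons, List.filter_nil]
  by_cases h : p.1 = "L" <;> simp [h]
lemma fR_append (s : List (String × Int × Int)) (p : String × Int × Int) :
    fR (s ++ [p]) = if p.1 = "R" then max (fR s) (p.2.1) else fR s := by
  simp only [fR, List.filter_append, List.map_append, List.foldl_append,
    List.filter_cons, List.filter_nil]
  by_cases h : p.1 = "R" <;> simp [h]
lemma fU_append (s : List (String × Int × Int)) (p : String × Int × Int) :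
    fU (s ++ [p]) = if p.1 = "U" then max (fU s) (-p.2.2) else fU s := by
  simp only [fU, List.filter_append, List.map_append, List.foldl_append,
    List.filter_cons, List.filter_nil]
  by_cases h : p.1 = "U" <;> simp [h]
lemma fD_append (s : List (String × Int × Int)) (p : String × Int × Int) :
    fD (s ++ [p]) = if p.1 = "D" then max (fD s) (p.2.2) else fD s := by
  simp only [fD, List.filter_append, List.map_append, List.foldl_append,
    List.filter_cons, List.filter_nil]
  by_cases h : p.1 = "D" <;> simp [h]


lemma dxOf_L : dxOf "L" = -1 := by decide
lemma dxOf_R : dxOf "R" = 1 := by decide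
lemma dxOf_U : dxOf "U" = 0 := by decide
lemma dxOf_D : dxOf "D" = 0 := by decide
lemma dyOf_L : dyOf "L" = 0 := by decide
lemma dyOf_R : dyOf "R" = 0 := by decide
lemma dyOf_U : dyOf "U" = -1 := by decide
lemma dyOf_D : dyOf "D" = 1 := by decide
lemma dxOf_other (d : String) (h1 : d ≠ "L") (h2 : d ≠ "R") : dxOf d = 0 := by
  simp [dxOf, PySem.Dict.getD, PySem.Dict.ofList, PySem.Dict.update, PySem.Dict.insert,
    PySem.Dict.empty, PySem.Dict.get?, Ne.symm h1, Ne.symm h2]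
lemma dyOf_other (d : String) (h1 : d ≠ "U") (h2 : d ≠ "D") : dyOf d = 0 := by
  simp [dyOf, PySem.Dict.getD, PySem.Dict.ofList, PySem.Dict.update, PySem.Dict.insert,
    PySem.Dict.empty, PySem.Dict.get?, Ne.symm h1, Ne.symm h2]

-- one step: A's state update agrees with B's record-then-aggregate view
lemma step_agree (x y : Int) (s : List (String × Int × Int)) (d : String) (c : Int) :
    stepA (x, y, fL s, fR s, fU s, fD s) d c
      = ((stepB (x, y, s) d c).1, (stepB (x, y, s) d c).2.1,
         fL (stepB (x, y, s) d c).2.2, fR (stepB (x, y, s) d c).2.2,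
         fU (stepB (x, y, s) d c).2.2, fD (stepB (x, y, s) d c).2.2) := by
  have hL := fL_nonneg s
  have hR := fR_nonneg s
  have hU := fU_nonneg s
  have hD := fD_nonneg s
  by_cases h1 : d = "L"
  · subst h1
    simp [stepA, stepB, dxOf_L, dyOf_L, fL_append, fR_append, fU_append, fD_append, max_def]
    all_goals omega
  by_cases h2 : d = "R"
  · subst h2
    simp [stepA, stepB, dxOf_R, dyOf_R, fL_append, fR_append, fU_append, fD_append, max_def]
    all_goals omega
  by_cases h3 : d = "U"
  · subst h3
    simp [stepA, stepB, dxOf_U, dyOf_U, fL_append, fR_append, fU_append, fD_append, max_def]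
    all_goals omega
  by_cases h4 : d = "D"
  · subst h4
    simp [stepA, stepB, dxOf_D, dyOf_D, fL_append, fR_append, fU_append, fD_append, max_def]
    all_goals omega
  simp [stepA, stepB, dxOf_other d h1 h2, dyOf_other d h3 h4,
    fL_append, fR_append, fU_append, fD_append, h1, h2, h3, h4]

-- the two loops, run over the same move list, stay related by the invariant
lemma loop_eq (l : List (String × Int)) :
    ∀ (x y : Int) (s : List (String × Int × Int)),
    l.foldl (fun st p => stepA st p.1 p.2) (x, y, fL s, fR s, fU s, fD s)
      = ((l.foldl (fun st p => stepB st p.1 p.2) (x, y, s)).1,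
         (l.foldl (fun st p => stepB st p.1 p.2) (x, y, s)).2.1,
         fL (l.foldl (fun st p => stepB st p.1 p.2) (x, y, s)).2.2,
         fR (l.foldl (fun st p => stepB st p.1 p.2) (x, y, s)).2.2,
         fU (l.foldl (fun st p => stepB st p.1 p.2) (x, y, s)).2.2,
         fD (l.foldl (fun st p => stepB st p.1 p.2) (x, y, s)).2.2) := by
  induction l with
  | nil => intro x y s; rfl
  | cons p l ih =>
    intro x y s
    simp only [List.foldl_cons]
    rw [step_agree x y s p.1 p.2]
    have : stepB (x, y, s) p.1 p.2
        = ((stepB (x, y, s) p.1 p.2).1, (stepB (x, y, s) p.1 p.2).2.1,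
           (stepB (x, y, s) p.1 p.2).2.2) := rfl
    rw [ih (stepB (x, y, s) p.1 p.2).1 (stepB (x, y, s) p.1 p.2).2.1 (stepB (x, y, s) p.1 p.2).2.2,
      ← this]

-- an indexed foldl over both lists is the foldl over their zip (when counts is not longer)
lemma zipfold {σ : Type} (g : σ → String → Int → σ) (cs : List Int) :
    ∀ (ds : List String) (init : σ), cs.length ≤ ds.length →
    (List.range cs.length).foldl (fun st k => g st (ds.getD k "") (cs.getD k 0)) init
      = (ds.zip cs).foldl (fun st p => g st p.1 p.2) init := by
  induction cs with
  | nil => intro ds init _; simp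
  | cons c cs ih =>
    intro ds init hlen
    cases ds with
    | nil => simp at hlen
    | cons d ds =>
      simp only [List.length_cons, List.range_succ_eq_map, List.foldl_cons, List.foldl_map,
        List.getD_cons_zero, List.getD_cons_succ, List.zip_cons_cons]
      exact ih ds (g init d c) (by simpa using hlen)

-- a port's pyRange/pyGetD loop as an indexed List.range loop
lemma pyloop_eq {σ : Type} (g : σ → String → Int → σ) (ds : List String) (cs : List Int)
    (init : σ) :
    (PySem.List.pyRange 0 (cs.length : Int) 1).foldl
        (fun st i => g st (PySem.List.pyGetD ds i "") (PySem.List.pyGetD cs i 0)) init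
      = (List.range cs.length).foldl (fun st k => g st (ds.getD k "") (cs.getD k 0)) init := by
  rw [PySem.List.pyRange_one, List.foldl_map]
  simp [PySem.List.pyGetD_natCast]

-- ===== VERDICT (by name: the statement is the Claim_ definition above) =====
theorem max_destination_counts_spec : Claim_equal_max_destination_counts := by
  intro destinations counts _hdom hpre
  unfold Spec_max_destination_counts max_destination_counts max_destination_counts_alt
  rw [pyloop_eq stepA destinations counts, pyloop_eq stepB destinations counts,
    zipfold stepA counts destinations _ hpre, zipfold stepB counts destinations _ hpre]
  have h0 : ((0 : Int), (0 : Int), (0 : Int), (0 : Int), (0 : Int), (0 : Int))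
      = ((0 : Int), (0 : Int), fL [], fR [], fU [], fD []) := rfl
  rw [h0, loop_eq (destinations.zip counts) 0 0 []]
  simp [pyMax0_eq, fL, fR, fU, fD]
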